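-- pv_equiv track=rewrite | github.com/OTOYO1020/ChatDev_Intermediate | WareHouse/C_153_DefaultOrganization_20250503080225/monster_attack.py | calculate_attacks
-- ===== SOURCE A (Python) =====
-- def calculate_attacks(n, k, h):
--     total_attacks = 0
--     h.sort(reverse=True)  # Sort health in descending order
--     for original_health in h:  # Iterate over the sorted health list
--         health = original_health  # Use a temporary variable for health
--         if health > 0 and k > 0:
--             health -= 1  # Use a special move
--             k -= 1
--         # Calculate attacks needed to bring health to 0 only if health is greater than 0
--         if health > 0:  # Corrected condition
--             total_attacks += health  # Calculate attacks needed to bring health to 0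
--     return total_attacks
-- ===== SOURCE B (Python) =====
-- def calculate_attacks(n, k, h):
--     # One pass: each special move removes exactly 1 from the total needed
--     # attacks as long as it hits a monster with positive health.
--     s = 0
--     c = 0
--     for x in h:
--         if x > 0:
--             s += x
--             c += 1
--     kk = k if k > 0 else 0
--     return s - (kk if kk < c else c)
-- ===== Notes on version B (the rewrite author's own statement) =====
-- stated objective: faster
-- what changed: Replaced sort-then-simulate with a single pass computing sum and count of positive healths, returning sum minus min(max(k,0), count); no sort, no per-element k bookkeeping. Note: A sorts h in place (a side effect B does not have); equivalence is about the return value.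
import Mathlib
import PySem

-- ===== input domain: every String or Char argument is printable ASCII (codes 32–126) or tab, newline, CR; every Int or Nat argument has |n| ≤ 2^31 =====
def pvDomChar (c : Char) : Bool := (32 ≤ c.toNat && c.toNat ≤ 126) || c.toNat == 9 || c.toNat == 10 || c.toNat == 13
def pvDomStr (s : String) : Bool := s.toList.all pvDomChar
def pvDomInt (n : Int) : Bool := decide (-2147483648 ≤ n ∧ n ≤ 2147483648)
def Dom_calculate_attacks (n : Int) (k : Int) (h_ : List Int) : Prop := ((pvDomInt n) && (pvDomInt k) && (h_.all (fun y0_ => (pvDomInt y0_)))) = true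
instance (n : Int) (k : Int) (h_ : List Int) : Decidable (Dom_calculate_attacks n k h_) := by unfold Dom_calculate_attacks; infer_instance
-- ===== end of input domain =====

-- B replaces A's sort-then-simulate loop by one pass: sum of positive healths minus
-- min(max(k,0), count of positive healths). Objective: faster (no sort).
-- Note: A sorts h in place (a caller-visible mutation B does not perform);
-- the equivalence proved here is about the return value only.

-- ===== PORT A =====
-- loop body of A: for each health, maybe spend a special move, then add remaining health
def pvA_loop (l : List Int) (total k : Int) : Int :=
  match l with
  | [] => total
  | x :: xs =>
    let health := x
    let st := if health > 0 ∧ k > 0 then (health - 1, k - 1) else (health, k)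
    let total' := if st.1 > 0 then total + st.1 else total
    pvA_loop xs total' st.2

def calculate_attacks (n : Int) (k : Int) (h_ : List Int) : Int :=
  pvA_loop (PySem.List.sorted h_ (fun x => x) true) 0 k

-- ===== PORT B =====
-- one pass: (sum of positive healths, count of positive healths)
def pvB_scan (l : List Int) : Int × Int :=
  l.foldl (fun sc x => if x > 0 then (sc.1 + x, sc.2 + 1) else sc) (0, 0)

def calculate_attacks_alt (n : Int) (k : Int) (h_ : List Int) : Int :=
  let sc := pvB_scan h_
  let kk := if k > 0 then k else 0
  sc.1 - (if kk < sc.2 then kk else sc.2)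

-- ===== PRECONDITION & SPEC =====
def Spec_calculate_attacks (n : Int) (k : Int) (h_ : List Int) (out : Int) : Prop := out = calculate_attacks_alt n k h_
instance (n : Int) (k : Int) (h_ : List Int) (out : Int) : Decidable (Spec_calculate_attacks n k h_ out) := by unfold Spec_calculate_attacks; infer_instance

-- ===== CLAIM (what is proved, stated in full; the proofs are below) =====
def Claim_equal_calculate_attacks : Prop := ∀ (n : Int) (k : Int) (h_ : List Int), Dom_calculate_attacks n k h_ → Spec_calculate_attacks n k h_ (calculate_attacks n k h_)

-- ===== LEMMAS AND PROOFS =====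

/-- sum of the positive elements -/
def pvPosSum : List Int → Int
  | [] => 0
  | x :: xs => (if x > 0 then x else 0) + pvPosSum xs

/-- count of the positive elements -/
def pvPosCnt : List Int → Int
  | [] => 0
  | x :: xs => (if x > 0 then 1 else 0) + pvPosCnt xs

theorem pvPosCnt_nonneg (l : List Int) : 0 ≤ pvPosCnt l := by
  induction l with
  | nil => simp [pvPosCnt]
  | cons x xs ih => simp only [pvPosCnt]; split <;> omega

theorem pvPosSum_map (l : List Int) : pvPosSum l = (l.map (fun x => if x > 0 then x else 0)).sum := by
  induction l with
  | nil => rfl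
  | cons x xs ih => simp [pvPosSum, ih]

theorem pvPosCnt_map (l : List Int) : pvPosCnt l = (l.map (fun x => if x > 0 then (1:Int) else 0)).sum := by
  induction l with
  | nil => rfl
  | cons x xs ih => simp [pvPosCnt, ih]

theorem pvPosSum_perm {l l' : List Int} (h : l.Perm l') : pvPosSum l = pvPosSum l' := by
  rw [pvPosSum_map, pvPosSum_map]; exact (h.map _).sum_eq

theorem pvPosCnt_perm {l l' : List Int} (h : l.Perm l') : pvPosCnt l = pvPosCnt l' := by
  rw [pvPosCnt_map, pvPosCnt_map]; exact (h.map _).sum_eq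

/-- A's loop, on ANY order of the list, equals the closed form. -/
theorem pvA_loop_eq (l : List Int) : ∀ total k,
    pvA_loop l total k = total + pvPosSum l - min (max k 0) (pvPosCnt l) := by
  induction l with
  | nil => intro t k; simp only [pvA_loop, pvPosSum, pvPosCnt]; omega
  | cons x xs ih =>
    intro t k
    have hc := pvPosCnt_nonneg xs
    simp only [pvA_loop, pvPosSum, pvPosCnt]
    split_ifs <;> simp only [] <;> rw [ih] <;> omega

/-- B's scan equals (pvPosSum, pvPosCnt). -/
theorem pvB_scan_eq (l : List Int) : ∀ s c,
    l.foldl (fun sc x => if x > 0 then (sc.1 + x, sc.2 + 1) else sc) (s, c)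
      = (s + pvPosSum l, c + pvPosCnt l) := by
  induction l with
  | nil => intro s c; simp [pvPosSum, pvPosCnt]
  | cons x xs ih =>
    intro s c
    by_cases hx : x > 0 <;>
      simp only [List.foldl, pvPosSum, pvPosCnt, hx, if_true, if_false] <;>
      rw [ih] <;> simp only [Prod.mk.injEq] <;> constructor <;> ring

-- ===== VERDICT (by name: the statement is the Claim_ definition above) =====
theorem calculate_attacks_spec : Claim_equal_calculate_attacks := by
  intro n k h_ _
  unfold Spec_calculate_attacks calculate_attacks calculate_attacks_alt pvB_scan
  have hperm : (PySem.List.sorted h_ (fun x => x) true).Perm h_ :=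
    PySem.List.sorted_perm ..
  rw [pvA_loop_eq, pvB_scan_eq, pvPosSum_perm hperm, pvPosCnt_perm hperm]
  have := pvPosCnt_nonneg h_
  simp only []
  split_ifs <;> omega
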